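-- pv_equiv track=rewrite | github.com/molgenis/aoc-2023 | mariska/my_solutions.py | get_sum_of_first_and_last_digit
-- ===== SOURCE A (Python) =====
-- def concatenate_numbers(number1, number2):
--     return str(number1) + str(number2)
--
-- def find_first_and_last(string, items_to_find):
--     first_index = len(string)
--     last_index = 0
--     first_item = ""
--     last_item = ""
--     for item in items_to_find:
--         try:
--             found_index = string.index(item)
--             found_rindex = string.rindex(item)
--             if found_index <= first_index:
--                 first_index = found_index
--                 first_item = item
--             if found_rindex <= first_index:
--                 first_index = found_rindex
--                 first_item = item
--             if found_index >= last_index: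
--                 last_index = found_index
--                 last_item = item
--             if found_rindex >= last_index:
--                 last_index = found_rindex
--                 last_item = item
--         except ValueError:
--             # Nothing's wrong. The item is just not in the string and python's being dramatic.
--             pass
--     return first_item, last_item
--
-- def string_number_to_int(number):
--     numbers_as_text = {"one": "1",
--                        "two": "2",
--                        "three": "3",
--                        "four": "4",
--                        "five": "5",
--                        "six": "6",
--                        "seven": "7",
--                        "eight": "8",
--                        "nine": "9"}
--     if number in numbers_as_text.keys():
--         return int(numbers_as_text[number])
--     else:
--         return int(number)
--
-- def get_sum_of_first_and_last_digit(calibration_file, matching_numbers):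
--     total = 0
--     for line in calibration_file:
--         first, last = find_first_and_last(line, matching_numbers)
--         first_number = string_number_to_int(first)
--         last_number = string_number_to_int(last)
--         number = concatenate_numbers(first_number, last_number)
--         total += int(number)
--     return total
-- ===== SOURCE B (Python) =====
-- # B: per-line positional scan (first hit scanning left->right, then right->left)
-- # instead of A's per-token index/rindex min/max bookkeeping.
-- def get_sum_of_first_and_last_digit(calibration_file, matching_numbers):
--     words = {"one": "1", "two": "2", "three": "3", "four": "4", "five": "5",
--              "six": "6", "seven": "7", "eight": "8", "nine": "9"}
--     total = 0
--     for line in calibration_file: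
--         first = None
--         for i in range(len(line)):
--             for tok in matching_numbers:
--                 if line.startswith(tok, i):
--                     first = tok
--             if first is not None:
--                 break
--         last = None
--         for i in range(len(line) - 1, -1, -1):
--             for tok in matching_numbers:
--                 if line.startswith(tok, i):
--                     last = tok
--             if last is not None:
--                 break
--         f = words[first] if first in words else str(int(first))
--         l = words[last] if last in words else str(int(last))
--         total += int(f + l)
--     return total
-- ===== Notes on version B (the rewrite author's own statement) =====
-- stated objective: alternative
-- what changed: A iterates over tokens maintaining min-index/max-rindex bookkeeping via str.index/str.rindex; B instead scans each line's character positions (left-to-right for the first token, right-to-left for the last) testing startswith, with the same last-in-iteration tie-break, and maps the chosen tokens through the word dict.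
import Mathlib
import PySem

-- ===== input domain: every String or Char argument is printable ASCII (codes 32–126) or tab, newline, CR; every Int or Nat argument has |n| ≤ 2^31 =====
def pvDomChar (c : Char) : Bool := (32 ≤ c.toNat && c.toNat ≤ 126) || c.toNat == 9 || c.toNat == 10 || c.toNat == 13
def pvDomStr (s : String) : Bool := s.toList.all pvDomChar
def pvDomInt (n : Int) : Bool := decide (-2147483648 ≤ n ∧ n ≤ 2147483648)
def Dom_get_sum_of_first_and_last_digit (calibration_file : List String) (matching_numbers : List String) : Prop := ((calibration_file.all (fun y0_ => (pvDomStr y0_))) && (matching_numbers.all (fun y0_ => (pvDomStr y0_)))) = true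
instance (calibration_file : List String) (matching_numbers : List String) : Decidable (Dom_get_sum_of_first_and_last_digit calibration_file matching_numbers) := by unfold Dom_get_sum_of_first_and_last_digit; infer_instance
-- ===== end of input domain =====

-- B replaces A's per-token index/rindex min/max bookkeeping by two positional scans of each
-- line (left->right for the first token, right->left for the last); same results, no speedup claimed.
-- Where Python A raises ValueError the ports encode the raise as `none` (final .getD 0); Pre_ excludes exactly those inputs.


-- ===== PORT A =====
-- the numbers_as_text dict literal of string_number_to_int
def pvNumbersAsText : PySem.Dict String String :=
  PySem.Dict.mk [("one","1"),("two","2"),("three","3"),("four","4"),("five","5"),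
                 ("six","6"),("seven","7"),("eight","8"),("nine","9")]

-- str(number1) + str(number2), kept at the char-list level (exact; avoids opaque String.append)
def concatenate_numbers (number1 : Int) (number2 : Int) : List Char :=
  PySem.Int.toChars number1 ++ PySem.Int.toChars number2

-- string.index/rindex → Chars.find/rfind; the try/except ValueError is the `find = -1` guard
def find_first_and_last (string : String) (items_to_find : List String) : String × String :=
  let s := string.toList
  let r := items_to_find.foldl
    (fun (st : Int × Int × String × String) item =>
      let idx := PySem.Chars.find s item.toList
      if idx = -1 then st
      else
        let ridx := PySem.Chars.rfind s item.toList
        let st := if idx ≤ st.1 then (idx, st.2.1, item, st.2.2.2) else st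
        let st := if ridx ≤ st.1 then (ridx, st.2.1, item, st.2.2.2) else st
        let st := if idx ≥ st.2.1 then (st.1, idx, st.2.2.1, item) else st
        if ridx ≥ st.2.1 then (st.1, ridx, st.2.2.1, item) else st)
    ((s.length : Int), 0, "", "")
  (r.2.2.1, r.2.2.2)

-- int(...) can raise ValueError: encoded as Option, none = raise
def string_number_to_int (number : String) : Option Int :=
  match pvNumbersAsText.get? number with
  | some v => PySem.Int.ofStr? v
  | none => PySem.Int.ofStr? number

def get_sum_of_first_and_last_digit (calibration_file : List String) (matching_numbers : List String) : Int :=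
  (calibration_file.foldl
    (fun (total : Option Int) line =>
      match total with
      | none => none
      | some t =>
        let fl := find_first_and_last line matching_numbers
        match string_number_to_int fl.1, string_number_to_int fl.2 with
        | some first_number, some last_number =>
          match PySem.Int.ofChars? (concatenate_numbers first_number last_number) with
          | some number => some (t + number)
          | none => none
        | _, _ => none)
    (some 0)).getD 0

-- ===== PORT B =====
-- line.startswith(tok, i) for 0 ≤ i ≤ len(line): tok is a prefix of line[i:]; keeps the LAST hit
def pvHitAt (s : List Char) (tokens : List String) (i : Nat) : Option String :=
  tokens.foldl (fun hit tok => if PySem.Chars.startswith (s.drop i) tok.toList then some tok else hit) none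

-- for i in range(j-1, -1, -1): scan positions downward, stop at the first position with a hit
def pvScanDown (s : List Char) (tokens : List String) : Nat → Option String
  | 0 => none
  | j+1 => (pvHitAt s tokens j).or (pvScanDown s tokens j)

-- B's word->digit dict display, entered key by key
def pvWords : PySem.Dict String String :=
  (((((((((PySem.Dict.empty.insert "one" "1").insert "two" "2").insert "three" "3").insert
      "four" "4").insert "five" "5").insert "six" "6").insert "seven" "7").insert
      "eight" "8").insert "nine" "9")

-- words[tok] if tok in words else str(int(tok));  none = int() raised
def pvDigits (tok : String) : Option (List Char) :=
  ((pvWords.get? tok).map String.toList).or ((PySem.Int.ofStr? tok).map PySem.Int.toChars)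

def get_sum_of_first_and_last_digit_alt (calibration_file : List String) (matching_numbers : List String) : Int :=
  (calibration_file.foldl
    (fun (total : Option Int) line =>
      let s := line.toList
      total.bind fun t =>
      ((List.range s.length).findSome? (pvHitAt s matching_numbers)).bind fun first =>
      (pvScanDown s matching_numbers s.length).bind fun last =>
      (pvDigits first).bind fun f =>
      (pvDigits last).bind fun l =>
      (PySem.Int.ofChars? (f ++ l)).map fun v => t + v)
    (some 0)).getD 0

-- ===== PRECONDITION & SPEC =====
-- helpers for Pre_: the token A selects in a line is characterised declaratively, without either
-- port's loop: first = the LAST token of the list attaining the MINIMAL occurrence position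
-- (str.index), last = the LAST token attaining the MAXIMAL rightmost position (str.rindex).
def pvWordKeys : List String := ["one","two","three","four","five","six","seven","eight","nine"]
-- int(first) must succeed (number word or any int literal)
def pvGoodFirst (t : String) : Bool := pvWordKeys.contains t || (PySem.Int.ofStr? t).isSome
-- int(last) must succeed AND be ≥ 0, else int(str(first)+str(last)) hits an inner '-' and raises
def pvGoodLast (t : String) : Bool :=
  pvWordKeys.contains t || (PySem.Int.ofStr? t).any (fun v => decide (0 ≤ v))
def pvFinds (s : List Char) (ts : List String) : List Int :=
  (ts.map fun t => PySem.Chars.find s t.toList).filter (fun i => decide (i ≠ -1))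
def pvRfinds (s : List Char) (ts : List String) : List Int :=
  (ts.map fun t => PySem.Chars.rfind s t.toList).filter (fun i => decide (i ≠ -1))
def pvLineOk (line : String) (ts : List String) : Bool :=
  (((pvFinds line.toList ts).min?.bind fun mf =>
      ts.reverse.find? fun t => PySem.Chars.find line.toList t.toList == mf).elim false pvGoodFirst)
  && (((pvRfinds line.toList ts).max?.bind fun mr =>
      ts.reverse.find? fun t => PySem.Chars.rfind line.toList t.toList == mr).elim false pvGoodLast)

-- Pre_ excludes exactly the inputs on which Python A raises ValueError: a line in which no token
-- of matching_numbers occurs (int('') raises), or whose selected first token is neither a number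
-- word nor an int literal, or whose selected last token is neither a number word nor a
-- NONNEGATIVE int literal (a negative last makes int(str(first)+str(last)) raise).
def Pre_get_sum_of_first_and_last_digit (calibration_file : List String) (matching_numbers : List String) : Prop :=
  ∀ line ∈ calibration_file, pvLineOk line matching_numbers = true
instance (calibration_file : List String) (matching_numbers : List String) : Decidable (Pre_get_sum_of_first_and_last_digit calibration_file matching_numbers) := by
  unfold Pre_get_sum_of_first_and_last_digit; infer_instance

def pvWitness_get_sum_of_first_and_last_digit : List String × List String :=
  (["two1nine", "a3bc4x"], ["one", "two", "nine", "1", "3", "4"])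

def Spec_get_sum_of_first_and_last_digit (calibration_file : List String) (matching_numbers : List String) (out : Int) : Prop := out = get_sum_of_first_and_last_digit_alt calibration_file matching_numbers
instance (calibration_file : List String) (matching_numbers : List String) (out : Int) : Decidable (Spec_get_sum_of_first_and_last_digit calibration_file matching_numbers out) := by unfold Spec_get_sum_of_first_and_last_digit; infer_instance

-- ===== CLAIM (what is proved, stated in full; the proofs are below) =====
def Claim_equal_get_sum_of_first_and_last_digit : Prop := ∀ (calibration_file : List String) (matching_numbers : List String), Dom_get_sum_of_first_and_last_digit calibration_file matching_numbers → Pre_get_sum_of_first_and_last_digit calibration_file matching_numbers → Spec_get_sum_of_first_and_last_digit calibration_file matching_numbers (get_sum_of_first_and_last_digit calibration_file matching_numbers)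

-- ===== LEMMAS AND PROOFS =====

-- ---- generic "last element satisfying p" fold (shape of pvHitAt's inner loop and of A's tie-break)
def pvLastSat (p : String → Bool) (ts : List String) : Option String :=
  ts.foldl (fun a t => if p t then some t else a) none
theorem pvLastSat_none (p : String → Bool) (ts : List String) (h : ∀ t ∈ ts, p t = false) :
    pvLastSat p ts = none := by
  induction ts with
  | nil => rfl
  | cons t ts ih =>
    simp only [pvLastSat, List.foldl_cons]
    rw [if_neg (by simp [h t (by simp)])]
    exact ih fun u hu => h u (by simp [hu])

theorem pvLastSat_snoc (p : String → Bool) (ts : List String) (t : String) :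
    pvLastSat p (ts ++ [t]) = if p t then some t else pvLastSat p ts := by
  simp [pvLastSat, List.foldl_append]

theorem pvLastSat_some (p : String → Bool) (ts : List String) (w : String)
    (h : pvLastSat p ts = some w) : w ∈ ts ∧ p w = true := by
  induction ts using List.reverseRecOn with
  | nil => simp [pvLastSat] at h
  | append_singleton ts t ih =>
    rw [pvLastSat_snoc] at h
    by_cases hp : p t
    · simp [hp] at h; subst h; simp [hp]
    · simp [hp] at h; rcases ih h with ⟨h1, h2⟩; exact ⟨by simp [h1], h2⟩

theorem pvLastSat_congr (p q : String → Bool) (ts : List String)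
    (h : ∀ t ∈ ts, p t = q t) : pvLastSat p ts = pvLastSat q ts := by
  unfold pvLastSat
  exact PySem.List.foldl_congr_mem ts _ _ none (fun a t ht => by rw [h t ht])

theorem pv_rfind_go_cases (s sub : List Char) (j : Nat) :
    (PySem.Chars.rfind.go s sub j = -1 ∧ ∀ i ≤ j, ¬ sub <+: s.drop i) ∨
    (∃ i : Nat, i ≤ j ∧ PySem.Chars.rfind.go s sub j = (i : Int) ∧ sub <+: s.drop i ∧
      ∀ k, i < k → k ≤ j → ¬ sub <+: s.drop k) := by
  induction j with
  | zero =>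
    by_cases h : sub.isPrefixOf s
    · right; exact ⟨0, le_refl 0, by simp [PySem.Chars.rfind.go, h], by
        simpa using (PySem.Chars.startswith_iff s sub).mp h, by omega⟩
    · left
      constructor
      · simp [PySem.Chars.rfind.go, h]
      · intro i hi
        interval_cases i
        intro hc
        exact h ((PySem.Chars.startswith_iff s sub).mpr (by simpa using hc))
  | succ j ih =>
    by_cases h : sub.isPrefixOf (s.drop (j+1))
    · right
      refine ⟨j+1, le_refl _, by simp [PySem.Chars.rfind.go, h], ?_, by omega⟩
      exact (PySem.Chars.startswith_iff _ sub).mp h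
    · have hgo : PySem.Chars.rfind.go s sub (j+1) = PySem.Chars.rfind.go s sub j := by
        simp [PySem.Chars.rfind.go, h]
      have hnot : ¬ sub <+: s.drop (j+1) := fun hc => h ((PySem.Chars.startswith_iff _ sub).mpr hc)
      rcases ih with ⟨h1, h2⟩ | ⟨i, hi, heq, hp, hmax⟩
      · left
        refine ⟨by rw [hgo]; exact h1, fun i hi => ?_⟩
        rcases Nat.lt_or_ge i (j+1) with hlt | hge
        · exact h2 i (by omega)
        · have : i = j+1 := by omega
          subst this; exact hnot
      · right
        refine ⟨i, by omega, by rw [hgo]; exact heq, hp, fun k hk1 hk2 => ?_⟩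
        rcases Nat.lt_or_ge k (j+1) with hlt | hge
        · exact hmax k hk1 (by omega)
        · have : k = j+1 := by omega
          subst this; exact hnot

theorem pv_rfind_cases (s sub : List Char) :
    (PySem.Chars.rfind s sub = -1 ∧ ∀ i ≤ s.length, ¬ sub <+: s.drop i) ∨
    (∃ i : Nat, i ≤ s.length ∧ PySem.Chars.rfind s sub = (i : Int) ∧ sub <+: s.drop i ∧
      ∀ k, i < k → k ≤ s.length → ¬ sub <+: s.drop k) :=
  pv_rfind_go_cases s sub s.length

theorem pv_rfind_le_length (s sub : List Char) :
    PySem.Chars.rfind s sub ≤ (s.length : Int) := by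
  rcases pv_rfind_cases s sub with ⟨h1, _⟩ | ⟨m, hm, heq, _, _⟩
  · rw [h1]; omega
  · rw [heq]; exact_mod_cast hm

theorem pv_rfind_nil (s : List Char) : PySem.Chars.rfind s [] = (s.length : Int) := by
  rcases pv_rfind_cases s [] with ⟨_, h2⟩ | ⟨m, hm, heq, _, hmax⟩
  · exact absurd (List.nil_prefix) (h2 s.length (le_refl _))
  · rw [heq]
    rcases Nat.lt_or_ge m s.length with hlt | hge
    · exact absurd List.nil_prefix (hmax s.length hlt (le_refl _))
    · congr 1; omega

theorem pv_le_rfind (s sub : List Char) (i : Nat) (hi : i ≤ s.length) (h : sub <+: s.drop i) :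
    (i : Int) ≤ PySem.Chars.rfind s sub := by
  rcases pv_rfind_cases s sub with ⟨_, h2⟩ | ⟨m, hm, heq, _, hmax⟩
  · exact absurd h (h2 i hi)
  · rw [heq]
    by_contra hc
    push Not at hc
    have : m < i := by exact_mod_cast hc
    exact hmax i this hi h

theorem pv_rfind_spec (s sub : List Char) (h : PySem.Chars.rfind s sub ≠ -1) :
    0 ≤ PySem.Chars.rfind s sub ∧ sub <+: s.drop (PySem.Chars.rfind s sub).toNat := by
  rcases pv_rfind_cases s sub with ⟨h1, _⟩ | ⟨m, _, heq, hp, _⟩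
  · exact absurd h1 h
  · rw [heq]; simpa using hp

theorem pv_find_neg_rfind_neg (s sub : List Char) (h : PySem.Chars.find s sub = -1) :
    PySem.Chars.rfind s sub = -1 := by
  rcases pv_rfind_cases s sub with ⟨h1, _⟩ | ⟨m, hm, heq, hp, _⟩
  · exact h1
  · exfalso
    have : sub <:+: s := by
      rw [← PySem.Chars.isIn_iff_infix, ← PySem.Chars.exists_prefix_drop_iff_isIn]
      exact ⟨m, hp⟩
    exact (PySem.Chars.find_ne_neg_one_iff s sub).mpr this h

theorem pv_find_le_rfind (s sub : List Char) (h : PySem.Chars.find s sub ≠ -1) :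
    PySem.Chars.find s sub ≤ PySem.Chars.rfind s sub := by
  have h0 : 0 ≤ PySem.Chars.find s sub := by
    have := PySem.Chars.neg_one_le_find s sub
    omega
  have hspec := PySem.Chars.find_spec (s := s) (sub := sub) h0
  have hlen := PySem.Chars.find_le_length s sub
  have : ((PySem.Chars.find s sub).toNat : Int) ≤ PySem.Chars.rfind s sub := by
    apply pv_le_rfind s sub _ (by omega) hspec.1
  omega

theorem pv_find_lt_length (s sub : List Char) (hne : sub ≠ []) (h : PySem.Chars.find s sub ≠ -1) :
    PySem.Chars.find s sub < s.length := by
  have h0 : 0 ≤ PySem.Chars.find s sub := by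
    have := PySem.Chars.neg_one_le_find s sub
    omega
  have hspec := PySem.Chars.find_spec (s := s) (sub := sub) h0
  have hlen := PySem.Chars.find_le_length s sub
  have hnil : s.drop (PySem.Chars.find s sub).toNat ≠ [] := by
    intro hc
    rw [hc] at hspec
    exact hne (List.prefix_nil.mp hspec.1)
  have : (PySem.Chars.find s sub).toNat < s.length := by simpa using hnil
  omega

-- ---- A's fold, split into the two independent (index, item) folds
def pvFStep (s : List Char) (st : Int × String) (t : String) : Int × String :=
  if PySem.Chars.find s t.toList ≠ -1 ∧ PySem.Chars.find s t.toList ≤ st.1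
  then (PySem.Chars.find s t.toList, t) else st

def pvLStep (s : List Char) (st : Int × String) (t : String) : Int × String :=
  if PySem.Chars.rfind s t.toList ≠ -1 ∧ PySem.Chars.rfind s t.toList ≥ st.1
  then (PySem.Chars.rfind s t.toList, t) else st
theorem pv_step_eq (s : List Char) (st : Int × Int × String × String) (t : String) :
    (let idx := PySem.Chars.find s t.toList
     if idx = -1 then st
     else
       let ridx := PySem.Chars.rfind s t.toList
       let st := if idx ≤ st.1 then (idx, st.2.1, t, st.2.2.2) else st
       let st := if ridx ≤ st.1 then (ridx, st.2.1, t, st.2.2.2) else st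
       let st := if idx ≥ st.2.1 then (st.1, idx, st.2.2.1, t) else st
       if ridx ≥ st.2.1 then (st.1, ridx, st.2.2.1, t) else st)
    = ((pvFStep s (st.1, st.2.2.1) t).1, (pvLStep s (st.2.1, st.2.2.2) t).1,
       (pvFStep s (st.1, st.2.2.1) t).2, (pvLStep s (st.2.1, st.2.2.2) t).2) := by
  obtain ⟨fi, li, fit, lit⟩ := st
  by_cases h : PySem.Chars.find s t.toList = -1
  · have hr := pv_find_neg_rfind_neg s t.toList h
    simp only [pvFStep, pvLStep, h, hr]
    simp
  · have hle := pv_find_le_rfind s t.toList h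
    have h0 : -1 ≤ PySem.Chars.find s t.toList := PySem.Chars.neg_one_le_find s t.toList
    have hrne : PySem.Chars.rfind s t.toList ≠ -1 := by omega
    simp only [pvFStep, pvLStep, h]
    simp only [ne_eq]
    split_ifs <;> simp_all <;> omega

theorem pv_fold4 (s : List Char) (ts : List String) :
    ∀ st : Int × Int × String × String,
    ts.foldl (fun (st : Int × Int × String × String) item =>
      let idx := PySem.Chars.find s item.toList
      if idx = -1 then st
      else
        let ridx := PySem.Chars.rfind s item.toList
        let st := if idx ≤ st.1 then (idx, st.2.1, item, st.2.2.2) else st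
        let st := if ridx ≤ st.1 then (ridx, st.2.1, item, st.2.2.2) else st
        let st := if idx ≥ st.2.1 then (st.1, idx, st.2.2.1, item) else st
        if ridx ≥ st.2.1 then (st.1, ridx, st.2.2.1, item) else st) st
    = ((ts.foldl (pvFStep s) (st.1, st.2.2.1)).1, (ts.foldl (pvLStep s) (st.2.1, st.2.2.2)).1,
       (ts.foldl (pvFStep s) (st.1, st.2.2.1)).2, (ts.foldl (pvLStep s) (st.2.1, st.2.2.2)).2) := by
  induction ts with
  | nil => intro st; rfl
  | cons t ts ih =>
    intro st
    simp only [List.foldl_cons]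
    rw [pv_step_eq s st t]
    exact ih _

theorem pv_ffl_eq (line : String) (ts : List String) :
    find_first_and_last line ts =
      ((ts.foldl (pvFStep line.toList) ((line.toList.length : Int), "")).2,
       (ts.foldl (pvLStep line.toList) (0, "")).2) := by
  have h := pv_fold4 line.toList ts ((line.toList.length : Int), 0, "", "")
  unfold find_first_and_last
  simp only at h ⊢
  rw [h]

theorem pv_fchar (s : List Char) (ts : List String)
    (hne : ∀ t ∈ ts, PySem.Chars.find s t.toList ≠ -1 → t.toList ≠ []) :
    (ts.foldl (pvFStep s) ((s.length : Int), "") = ((s.length : Int), "") ∧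
      ∀ t ∈ ts, PySem.Chars.find s t.toList = -1) ∨
    (let r := ts.foldl (pvFStep s) ((s.length : Int), "")
     0 ≤ r.1 ∧ r.1 < s.length ∧
     pvLastSat (fun t => PySem.Chars.find s t.toList == r.1) ts = some r.2 ∧
     ∀ t ∈ ts, PySem.Chars.find s t.toList ≠ -1 → r.1 ≤ PySem.Chars.find s t.toList) := by
  induction ts using List.reverseRecOn with
  | nil => left; exact ⟨rfl, by simp⟩
  | append_singleton ts t ih =>
    have hne' : ∀ u ∈ ts, PySem.Chars.find s u.toList ≠ -1 → u.toList ≠ [] :=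
      fun u hu => hne u (by simp [hu])
    rw [List.foldl_append]
    rcases ih hne' with ⟨h1, h2⟩ | ih2
    · rw [h1]
      by_cases ht : PySem.Chars.find s t.toList = -1
      · left
        refine ⟨by simp [pvFStep, ht], fun u hu => ?_⟩
        rcases List.mem_append.mp hu with h | h
        · exact h2 u h
        · simp at h; subst h; exact ht
      · right
        have h0 : -1 ≤ PySem.Chars.find s t.toList := PySem.Chars.neg_one_le_find s t.toList
        have hlen : PySem.Chars.find s t.toList ≤ (s.length : Int) := PySem.Chars.find_le_length s t.toList
        have hstep : pvFStep s ((s.length : Int), "") t = (PySem.Chars.find s t.toList, t) := by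
          simp [pvFStep, ht, hlen]
        rw [List.foldl_cons, List.foldl_nil, hstep]
        refine ⟨by omega, pv_find_lt_length s t.toList (hne t (by simp) ht) ht, ?_, ?_⟩
        · rw [pvLastSat_snoc, if_pos (by simp)]
        · intro u hu hu2
          rcases List.mem_append.mp hu with h | h
          · exact absurd (h2 u h) hu2
          · simp at h; subst h; omega
    · simp only at ih2
      obtain ⟨hge, hlt, hsat, hmin⟩ := ih2
      set r := ts.foldl (pvFStep s) ((s.length : Int), "") with hr
      by_cases ht : PySem.Chars.find s t.toList = -1
      · right
        have hstep : pvFStep s r t = r := by simp [pvFStep, ht]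
        rw [List.foldl_cons, List.foldl_nil, hstep]
        refine ⟨hge, hlt, ?_, ?_⟩
        · rw [pvLastSat_snoc, if_neg (by simp [ht]; omega)]
          exact hsat
        · intro u hu hu2
          rcases List.mem_append.mp hu with h | h
          · exact hmin u h hu2
          · simp at h; subst h; exact absurd ht hu2
      · right
        rw [List.foldl_cons, List.foldl_nil]
        by_cases hle : PySem.Chars.find s t.toList ≤ r.1
        · have hstep : pvFStep s r t = (PySem.Chars.find s t.toList, t) := by
            simp [pvFStep, ht, hle]
          rw [hstep]
          have h0 : -1 ≤ PySem.Chars.find s t.toList := PySem.Chars.neg_one_le_find s t.toList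
          refine ⟨by omega, by omega, ?_, ?_⟩
          · rw [pvLastSat_snoc, if_pos (by simp)]
          · intro u hu hu2
            rcases List.mem_append.mp hu with h | h
            · have := hmin u h hu2; omega
            · simp at h; subst h; omega
        · have hstep : pvFStep s r t = r := by
            simp only [pvFStep]; rw [if_neg (by omega)]
          rw [hstep]
          refine ⟨hge, hlt, ?_, ?_⟩
          · rw [pvLastSat_snoc, if_neg (by simp; omega)]
            exact hsat
          · intro u hu hu2
            rcases List.mem_append.mp hu with h | h
            · exact hmin u h hu2
            · simp at h; subst h; omega

theorem pv_lchar (s : List Char) (ts : List String) :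
    (ts.foldl (pvLStep s) (0, "") = (0, "") ∧
      ∀ t ∈ ts, PySem.Chars.rfind s t.toList = -1) ∨
    (let r := ts.foldl (pvLStep s) (0, "")
     0 ≤ r.1 ∧
     pvLastSat (fun t => PySem.Chars.rfind s t.toList == r.1) ts = some r.2 ∧
     ∀ t ∈ ts, PySem.Chars.rfind s t.toList ≠ -1 → PySem.Chars.rfind s t.toList ≤ r.1) := by
  induction ts using List.reverseRecOn with
  | nil => left; exact ⟨rfl, by simp⟩
  | append_singleton ts t ih =>
    rw [List.foldl_append, List.foldl_cons, List.foldl_nil]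
    rcases ih with ⟨h1, h2⟩ | ih2
    · rw [h1]
      by_cases ht : PySem.Chars.rfind s t.toList = -1
      · left
        refine ⟨by simp [pvLStep, ht], fun u hu => ?_⟩
        rcases List.mem_append.mp hu with h | h
        · exact h2 u h
        · simp at h; subst h; exact ht
      · right
        have h0 : 0 ≤ PySem.Chars.rfind s t.toList := (pv_rfind_spec s t.toList ht).1
        have hstep : pvLStep s (0, "") t = (PySem.Chars.rfind s t.toList, t) := by
          simp [pvLStep, ht]; omega
        rw [hstep]
        refine ⟨h0, by rw [pvLastSat_snoc, if_pos (by simp)], ?_⟩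
        intro u hu hu2
        rcases List.mem_append.mp hu with h | h
        · exact absurd (h2 u h) hu2
        · simp at h; subst h; omega
    · simp only at ih2
      obtain ⟨hge, hsat, hmax⟩ := ih2
      set r := ts.foldl (pvLStep s) (0, "") with hr
      by_cases ht : PySem.Chars.rfind s t.toList = -1
      · right
        have hstep : pvLStep s r t = r := by simp [pvLStep, ht]
        rw [hstep]
        refine ⟨hge, ?_, ?_⟩
        · rw [pvLastSat_snoc, if_neg (by simp [ht]; omega)]
          exact hsat
        · intro u hu hu2
          rcases List.mem_append.mp hu with h | h
          · exact hmax u h hu2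
          · simp at h; subst h; exact absurd ht hu2
      · right
        have h0 : 0 ≤ PySem.Chars.rfind s t.toList := (pv_rfind_spec s t.toList ht).1
        by_cases hge2 : PySem.Chars.rfind s t.toList ≥ r.1
        · have hstep : pvLStep s r t = (PySem.Chars.rfind s t.toList, t) := by
            simp [pvLStep, ht, hge2]
          rw [hstep]
          refine ⟨h0, by rw [pvLastSat_snoc, if_pos (by simp)], ?_⟩
          intro u hu hu2
          rcases List.mem_append.mp hu with h | h
          · have := hmax u h hu2; omega
          · simp at h; subst h; omega
        · have hstep : pvLStep s r t = r := by
            simp only [pvLStep]; rw [if_neg (by omega)]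
          rw [hstep]
          refine ⟨hge, ?_, ?_⟩
          · rw [pvLastSat_snoc, if_neg (by simp; omega)]
            exact hsat
          · intro u hu hu2
            rcases List.mem_append.mp hu with h | h
            · exact hmax u h hu2
            · simp at h; subst h; omega

theorem pv_findSome?_range {α : Type} (f : Nat → Option α) (n m : Nat) (w : α) (hm : m < n)
    (hnone : ∀ i < m, f i = none) (hw : f m = some w) :
    (List.range n).findSome? f = some w := by
  induction n with
  | zero => omega
  | succ n ih =>
    rw [List.range_succ, List.findSome?_append]
    rcases Nat.lt_or_ge m n with hlt | hge
    · rw [ih hlt]; rfl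
    · have : m = n := by omega
      subst this
      have : (List.range m).findSome? f = none := by
        rw [List.findSome?_eq_none_iff]
        intro x hx
        exact hnone x (List.mem_range.mp hx)
      rw [this]
      simpa using hw

theorem pv_scanDown_eq (s : List Char) (toks : List String) (w : String) (M : Nat)
    (hw : pvHitAt s toks M = some w) :
    ∀ j, M < j → (∀ i, M < i → i < j → pvHitAt s toks i = none) → pvScanDown s toks j = some w := by
  intro j
  induction j with
  | zero => omega
  | succ j ih =>
    intro hj hnone
    rcases Nat.lt_or_ge M j with hlt | hge
    · have hj' : pvHitAt s toks j = none := hnone j hlt (by omega)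
      simp only [pvScanDown, hj', Option.none_or]
      exact ih hlt fun i h1 h2 => hnone i h1 (by omega)
    · have : M = j := by omega
      subst this
      simp only [pvScanDown, hw, Option.some_or]

theorem pv_occ (s sub : List Char) (i : Nat) (h : sub <+: s.drop i) :
    PySem.Chars.find s sub ≠ -1 ∧ PySem.Chars.find s sub ≤ (i : Int) := by
  have hin : PySem.Chars.find s sub ≠ -1 := by
    rw [PySem.Chars.find_ne_neg_one_iff, ← PySem.Chars.isIn_iff_infix,
        ← PySem.Chars.exists_prefix_drop_iff_isIn]
    exact ⟨i, h⟩
  have h0 : 0 ≤ PySem.Chars.find s sub := by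
    have := PySem.Chars.neg_one_le_find s sub; omega
  refine ⟨hin, ?_⟩
  have hspec := PySem.Chars.find_spec (s := s) (sub := sub) h0
  by_contra hc
  exact hspec.2 i (by omega) h

theorem pv_first_sel (s : List Char) (ts : List String)
    (hne : ∀ t ∈ ts, PySem.Chars.find s t.toList ≠ -1 → t.toList ≠ [])
    (hpres : ∃ t ∈ ts, PySem.Chars.find s t.toList ≠ -1) :
    (List.range s.length).findSome? (pvHitAt s ts) =
      some (ts.foldl (pvFStep s) ((s.length : Int), "")).2 := by
  rcases pv_fchar s ts hne with ⟨_, h2⟩ | hchar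
  · obtain ⟨t, ht, hft⟩ := hpres; exact absurd (h2 t ht) hft
  · simp only at hchar
    obtain ⟨h0, hlt, hsat, hmin⟩ := hchar
    set r := ts.foldl (pvFStep s) ((s.length : Int), "") with hr
    have hmn : r.1.toNat < s.length := by omega
    apply pv_findSome?_range _ _ r.1.toNat _ hmn
    · intro i hi
      apply pvLastSat_none
      intro t ht
      by_contra hc
      simp only [Bool.not_eq_false, PySem.Chars.startswith_iff] at hc
      have := pv_occ s t.toList i hc
      have := hmin t ht this.1
      omega
    · have hcongr : pvHitAt s ts r.1.toNat =
          pvLastSat (fun t => PySem.Chars.find s t.toList == r.1) ts := by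
        apply pvLastSat_congr
        intro t ht
        rw [Bool.eq_iff_iff, PySem.Chars.startswith_iff, beq_iff_eq]
        constructor
        · intro hp
          have h1 := pv_occ s t.toList r.1.toNat hp
          have h2 := hmin t ht h1.1
          omega
        · intro hfe
          have h0' : 0 ≤ PySem.Chars.find s t.toList := by omega
          have hspec := PySem.Chars.find_spec (s := s) (sub := t.toList) h0'
          rw [hfe] at hspec
          exact hspec.1
      rw [hcongr, hsat]

theorem pv_last_sel (s : List Char) (ts : List String)
    (hne : ∀ t ∈ ts, PySem.Chars.find s t.toList ≠ -1 → t.toList ≠ [])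
    (hpres : ∃ t ∈ ts, PySem.Chars.find s t.toList ≠ -1) :
    pvScanDown s ts s.length = some (ts.foldl (pvLStep s) (0, "")).2 := by
  rcases pv_lchar s ts with ⟨_, h2⟩ | hchar
  · obtain ⟨t, ht, hft⟩ := hpres
    have ha := pv_find_le_rfind s t.toList hft
    have hb := PySem.Chars.neg_one_le_find s t.toList
    rw [h2 t ht] at ha
    omega
  · simp only at hchar
    obtain ⟨h0, hsat, hmax⟩ := hchar
    set r := ts.foldl (pvLStep s) (0, "") with hr
    obtain ⟨hwmem, hwp⟩ := pvLastSat_some _ _ _ hsat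
    have hwrf : PySem.Chars.rfind s r.2.toList = r.1 := by simpa using hwp
    have hwne : PySem.Chars.rfind s r.2.toList ≠ -1 := by omega
    have hwspec := pv_rfind_spec s r.2.toList hwne
    have hwfind : PySem.Chars.find s r.2.toList ≠ -1 := by
      intro hc
      have h1 := pv_occ s r.2.toList (PySem.Chars.rfind s r.2.toList).toNat hwspec.2
      exact h1.1 hc
    have hwnil : r.2.toList ≠ [] := hne r.2 hwmem hwfind
    have hMlt : r.1.toNat < s.length := by
      have hp := hwspec.2
      rw [hwrf] at hp
      rcases hp with ⟨u, hu⟩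
      have : s.drop r.1.toNat ≠ [] := by
        intro hc; rw [hc] at hu
        exact hwnil (List.append_eq_nil_iff.mp hu).1
      have := List.length_drop (l := s) (i := r.1.toNat) ▸ List.length_pos_iff.mpr this
      omega
    have hcongr : pvHitAt s ts r.1.toNat =
        pvLastSat (fun t => PySem.Chars.rfind s t.toList == r.1) ts := by
      apply pvLastSat_congr
      intro t ht
      rw [Bool.eq_iff_iff, PySem.Chars.startswith_iff, beq_iff_eq]
      constructor
      · intro hp
        have hle := pv_le_rfind s t.toList r.1.toNat (by omega) hp
        have hrne : PySem.Chars.rfind s t.toList ≠ -1 := by omega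
        have hfne : PySem.Chars.find s t.toList ≠ -1 := (pv_occ s t.toList r.1.toNat hp).1
        have := hmax t ht hrne
        omega
      · intro hre
        have hrne : PySem.Chars.rfind s t.toList ≠ -1 := by omega
        have hspec := pv_rfind_spec s t.toList hrne
        rw [hre] at hspec
        exact hspec.2
    apply pv_scanDown_eq s ts r.2 r.1.toNat
    · rw [hcongr]; exact hsat
    · omega
    · intro i h1 h2
      apply pvLastSat_none
      intro t ht
      by_contra hc
      simp only [Bool.not_eq_false, PySem.Chars.startswith_iff] at hc
      have hle := pv_le_rfind s t.toList i (by omega) hc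
      have hrne : PySem.Chars.rfind s t.toList ≠ -1 := by omega
      have := hmax t ht hrne
      omega

-- ---- conversion: B's digit string is A's int rendered back to chars
theorem pv_digits_eq (tok : String) :
    pvDigits tok = (string_number_to_int tok).map PySem.Int.toChars := by
  unfold pvDigits string_number_to_int
  have hdicts : pvWords = pvNumbersAsText := by decide
  rw [hdicts]
  cases hg : pvNumbersAsText.get? tok with
  | none => simp
  | some v =>
    simp only []
    have hnd : pvNumbersAsText.keys.Nodup := by decide
    have hmem := (PySem.Dict.get?_eq_some_iff_mem_items pvNumbersAsText tok v hnd).mp hg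
    simp only [pvNumbersAsText, List.mem_cons, List.not_mem_nil, or_false,
      Prod.mk.injEq] at hmem
    rcases hmem with ⟨_, rfl⟩ | ⟨_, rfl⟩ | ⟨_, rfl⟩ | ⟨_, rfl⟩ | ⟨_, rfl⟩ | ⟨_, rfl⟩ |
      ⟨_, rfl⟩ | ⟨_, rfl⟩ | ⟨_, rfl⟩ <;> rfl

-- ---- the two facts the equivalence needs from pvLineOk: some token occurs, and no occurring token is empty
theorem pv_lineOk_pres (line : String) (ts : List String) (hok : pvLineOk line ts = true) :
    ∃ t ∈ ts, PySem.Chars.find line.toList t.toList ≠ -1 := by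
  unfold pvLineOk at hok
  cases hmf : (pvFinds line.toList ts).min? with
  | none => rw [hmf] at hok; simp at hok
  | some mf =>
    have hmem := (List.min?_eq_some_iff.mp hmf).1
    simp only [pvFinds, List.mem_filter, List.mem_map] at hmem
    obtain ⟨⟨t, ht, hft⟩, hne⟩ := hmem
    exact ⟨t, ht, by rw [hft]; simpa using hne⟩

theorem pv_lineOk_ne (line : String) (ts : List String) (hok : pvLineOk line ts = true) :
    ∀ t ∈ ts, PySem.Chars.find line.toList t.toList ≠ -1 → t.toList ≠ [] := by
  intro t ht _ hnil
  have hts : t = "" := String.toList_eq_nil_iff.mp hnil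
  subst hts
  unfold pvLineOk at hok
  cases hmr : (pvRfinds line.toList ts).max? with
  | none =>
    rw [hmr] at hok
    simp at hok
  | some mr =>
    rw [hmr] at hok
    simp only [Bool.and_eq_true, Option.bind_some] at hok
    have hlen : PySem.Chars.rfind line.toList ("" : String).toList = (line.toList.length : Int) := by
      rw [show ("" : String).toList = [] from rfl]
      exact pv_rfind_nil line.toList
    -- the max of the rfind positions is exactly the line length (the empty token attains it)
    have hmax := List.max?_eq_some_iff.mp hmr
    have hin : (line.toList.length : Int) ∈ pvRfinds line.toList ts := by
      simp only [pvRfinds, List.mem_filter, List.mem_map]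
      refine ⟨⟨"", ht, hlen⟩, by simp⟩
    have hge : (line.toList.length : Int) ≤ mr := hmax.2 _ hin
    have hle : mr ≤ (line.toList.length : Int) := by
      have := hmax.1
      simp only [pvRfinds, List.mem_filter, List.mem_map] at this
      obtain ⟨⟨u, _, hu⟩, _⟩ := this
      rw [← hu]
      exact pv_rfind_le_length line.toList u.toList
    have hmr_len : mr = (line.toList.length : Int) := by omega
    -- hence the selected last token is an empty-string token, which pvGoodLast rejects
    have hcond : (fun u => PySem.Chars.rfind line.toList u.toList == mr) "" = true := by
      simp only [hlen, hmr_len, beq_self_eq_true]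
    have hsome : (ts.reverse.find? fun u => PySem.Chars.rfind line.toList u.toList == mr).isSome := by
      exact List.find?_isSome.mpr ⟨"", by simpa using ht, hcond⟩
    obtain ⟨w, hw⟩ := Option.isSome_iff_exists.mp hsome
    have hpw : PySem.Chars.rfind line.toList w.toList = mr := by
      have := List.find?_some hw
      simpa using this
    have hwnil : w.toList = [] := by
      have hne2 : PySem.Chars.rfind line.toList w.toList ≠ -1 := by
        rw [hpw, hmr_len]; omega
      have hsp := (pv_rfind_spec line.toList w.toList hne2).2
      rw [hpw, hmr_len] at hsp
      rw [show ((line.toList.length : Int)).toNat = line.toList.length from by omega,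
          List.drop_length] at hsp
      exact List.prefix_nil.mp hsp
    have hwe : w = "" := String.toList_eq_nil_iff.mp hwnil
    subst hwe
    rw [hw] at hok
    have hbad : pvGoodLast "" = false := by decide
    simp [hbad] at hok

-- ===== VERDICT (by name: the statement is the Claim_ definition above) =====
theorem get_sum_of_first_and_last_digit_spec : Claim_equal_get_sum_of_first_and_last_digit := by
  unfold Claim_equal_get_sum_of_first_and_last_digit
  intro calibration_file matching_numbers _ hpre
  unfold Spec_get_sum_of_first_and_last_digit
  unfold get_sum_of_first_and_last_digit get_sum_of_first_and_last_digit_alt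
  congr 1
  apply PySem.List.foldl_congr_mem
  intro acc line hmem
  cases acc with
  | none => rfl
  | some t =>
    have hok := hpre line hmem
    have hpres := pv_lineOk_pres line matching_numbers hok
    have hne := pv_lineOk_ne line matching_numbers hok
    rw [pv_ffl_eq line matching_numbers]
    simp only [pv_first_sel line.toList matching_numbers hne hpres,
        pv_last_sel line.toList matching_numbers hne hpres, pv_digits_eq]
    cases hF : string_number_to_int (matching_numbers.foldl (pvFStep line.toList) ((line.length : Int), "")).2 with
    | none => simp [hF]
    | some fn =>
      cases hL : string_number_to_int (matching_numbers.foldl (pvLStep line.toList) (0, "")).2 with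
      | none => simp [hF, hL]
      | some ln =>
        cases hC : PySem.Int.ofChars? (PySem.Int.toChars fn ++ PySem.Int.toChars ln) with
        | none => simp [hF, hL, concatenate_numbers, hC]
        | some v => simp [hF, hL, concatenate_numbers, hC]
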